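-- pv_equiv track=rewrite | github.com/pmCrawler/soccer_analysis | rxconfig.py | _inject_imports
-- ===== SOURCE A (Python) =====
-- _CSS_FILES = ["tokens.css", "views.css", "components.css"]
--
-- def _inject_imports(content: str) -> str:
--     imports = [f'@import "./{name}";' for name in _CSS_FILES]
--     for line in imports:
--         if line not in content:
--             marker = "@tailwind components;"
--             if marker in content:
--                 content = content.replace(marker, f"{line}\n\n{marker}", 1)
--             else:
--                 content += f"\n{line}\n"
--     return content
-- ===== SOURCE B (Python) =====
-- _CSS_FILES = ["tokens.css", "views.css", "components.css"]
--
-- def _inject_imports(content: str) -> str: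
--     missing = [line for line in (f'@import "./{name}";' for name in _CSS_FILES)
--                if line not in content]
--     if not missing:
--         return content
--     marker = "@tailwind components;"
--     block = "\n\n".join(missing)
--     if marker in content:
--         return content.replace(marker, f"{block}\n\n{marker}", 1)
--     return f"{content}\n{block}\n"
-- ===== Notes on version B (the rewrite author's own statement) =====
-- stated objective: simpler
-- what changed: B filters the three fixed import lines against the original content once to get the missing list, then performs a single batched edit (one first-occurrence replace before the marker, or one append of the joined block), instead of A's three sequential membership-test-and-edit passes over the mutated string.
import Mathlib
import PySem

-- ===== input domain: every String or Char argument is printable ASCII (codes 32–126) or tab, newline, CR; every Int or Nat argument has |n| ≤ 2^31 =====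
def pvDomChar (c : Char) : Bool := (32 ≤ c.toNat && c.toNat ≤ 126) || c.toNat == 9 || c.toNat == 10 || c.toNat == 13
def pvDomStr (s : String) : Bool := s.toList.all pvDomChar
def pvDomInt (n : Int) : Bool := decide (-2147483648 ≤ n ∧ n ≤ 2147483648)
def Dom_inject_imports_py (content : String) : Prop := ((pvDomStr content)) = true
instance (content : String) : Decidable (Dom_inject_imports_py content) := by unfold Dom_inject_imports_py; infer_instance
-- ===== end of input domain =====

-- B batches the edit: it filters the three import lines against the ORIGINAL content once and
-- performs a single replace (before the marker) or a single append, instead of A's three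
-- sequential test-and-edit passes over the mutated string; objective: simpler.

-- ===== PORT A =====
-- module constant _CSS_FILES
def pvCssFiles : List String := ["tokens.css", "views.css", "components.css"]
-- f'@import "./{name}";'
def pvLine (name : String) : List Char :=
  "@import \"./".toList ++ name.toList ++ "\";".toList
-- "@tailwind components;"
def pvMarker : List Char := "@tailwind components;".toList
-- shared primitive, exact port of Python str.replace(old, new, 1) on code points:
-- scan left to right, replace the first occurrence of `old` (if any), leave the rest.
def pvRep1 (old new : List Char) : List Char → List Char
  | [] => if old.isPrefixOf ([] : List Char) then new ++ List.drop old.length [] else []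
  | a :: c =>
      if old.isPrefixOf (a :: c) then new ++ List.drop old.length (a :: c)
      else a :: pvRep1 old new c
-- the for-loop of A: fold over the import lines, mutating `content`
def pvInjA : List (List Char) → List Char → List Char
  | [], c => c
  | line :: rest, c =>
      pvInjA rest
        (if PySem.Chars.isIn line c = false then
          (if PySem.Chars.isIn pvMarker c = true then
            pvRep1 pvMarker (line ++ "\n\n".toList ++ pvMarker) c
          else c ++ "\n".toList ++ line ++ "\n".toList)
        else c)

def inject_imports_py (content : String) : String :=
  String.ofList (pvInjA (pvCssFiles.map pvLine) content.toList)

-- ===== PORT B =====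
-- B: collect the missing lines against the original content, then one batched edit
def pvInjB (c : List Char) : List Char :=
  let missing := (pvCssFiles.map pvLine).filter (fun l => ! PySem.Chars.isIn l c)
  if missing.isEmpty then c
  else
    let block := PySem.Chars.join "\n\n".toList missing
    if PySem.Chars.isIn pvMarker c = true then
      pvRep1 pvMarker (block ++ "\n\n".toList ++ pvMarker) c
    else c ++ "\n".toList ++ block ++ "\n".toList

def inject_imports_py_alt (content : String) : String :=
  String.ofList (pvInjB content.toList)

-- ===== PRECONDITION & SPEC =====
def Spec_inject_imports_py (content : String) (out : String) : Prop := out = inject_imports_py_alt content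
instance (content : String) (out : String) : Decidable (Spec_inject_imports_py content out) := by unfold Spec_inject_imports_py; infer_instance

-- ===== CLAIM (what is proved, stated in full; the proofs are below) =====
def Claim_equal_inject_imports_py : Prop := ∀ (content : String), Dom_inject_imports_py content → Spec_inject_imports_py content (inject_imports_py content)

-- ===== LEMMAS AND PROOFS =====

lemma nl_eq : "\n".toList = ['\n'] := rfl
lemma nn_eq : "\n\n".toList = ['\n', '\n'] := rfl

-- a prefix no longer than the first summand is a prefix of the first summand
lemma pfx_short {d y : List Char} (z : List Char) (h : d.length ≤ y.length) :
    d <+: y ++ z ↔ d <+: y := by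
  constructor
  · intro hd; exact List.prefix_of_prefix_length_le hd (List.prefix_append y z) h
  · intro hd; exact hd.trans (List.prefix_append y z)

-- a newline-free prefix cannot reach past a '\n' border
lemma pfx_nonl {d y z : List Char} (hn : '\n' ∉ d) (h : d <+: y ++ '\n' :: z) : d <+: y := by
  rcases le_or_gt d.length y.length with hle | hlt
  · exact (pfx_short _ hle).mp h
  · exfalso; apply hn
    have h1 : y ++ ['\n'] <+: y ++ '\n' :: z :=
      (List.prefix_append_right_inj y).mpr ⟨z, rfl⟩
    have h2 : y ++ ['\n'] <+: d :=
      List.prefix_of_prefix_length_le h1 h (by simp; omega)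
    exact h2.subset (by simp)

-- a nonempty suffix of a list ending in '\n' contains '\n'
lemma suffix_last_mem {e y : List Char} (hs : e <:+ y) (he : e ≠ [])
    (hy : y.getLast? = some '\n') : '\n' ∈ e := by
  obtain ⟨u, rfl⟩ := hs
  rw [List.getLast?_append_of_ne_nil u he] at hy
  exact List.mem_of_getLast? hy

-- helper: drop past the first summand
lemma drop_append_ge (a b : List Char) (n : Nat) (h : a.length ≤ n) :
    (a ++ b).drop n = b.drop (n - a.length) := by
  rw [List.drop_append, List.drop_eq_nil_of_le h, List.nil_append]

-- an occurrence in a ++ b lies in a, lies in b, or straddles the border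
lemma infix_append_cases (L a b : List Char) (h : L <:+: a ++ b) :
    L <:+: a ∨ L <:+: b ∨
      ∃ k, 0 < k ∧ k < L.length ∧ L.take k <:+ a ∧ L.drop k <+: b := by
  obtain ⟨s, t, hst⟩ := h
  rcases le_or_gt (s.length + L.length) a.length with h1 | h1
  · left
    have hp1 : s ++ L <+: a ++ b := ⟨t, hst⟩
    have hp : s ++ L <+: a :=
      List.prefix_of_prefix_length_le hp1 (List.prefix_append a b) (by simpa using h1)
    obtain ⟨r, hr⟩ := hp
    exact ⟨s, r, hr⟩
  · rcases le_or_gt a.length s.length with h2 | h2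
    · right; left
      have hp : a <+: s :=
        List.prefix_of_prefix_length_le (List.prefix_append a b)
          ⟨L ++ t, by simpa [List.append_assoc] using hst⟩ h2
      obtain ⟨s', hs⟩ := hp
      refine ⟨s', t, ?_⟩
      apply List.append_cancel_left (as := a)
      have hst' : ((a ++ s') ++ L) ++ t = a ++ b := by rw [hs]; exact hst
      simpa [List.append_assoc] using hst'
    · right; right
      refine ⟨a.length - s.length, by omega, by omega, ?_, ?_⟩
      · refine ⟨s, ?_⟩
        have hA2 : ((s ++ L) ++ t).take a.length = s ++ L.take (a.length - s.length) := by
          rw [List.take_append, List.take_append,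
            List.take_of_length_le (by omega : s.length ≤ a.length),
            List.length_append,
            show a.length - (s.length + L.length) = 0 by omega, List.take_zero,
            List.append_nil]
        calc s ++ L.take (a.length - s.length)
            = ((s ++ L) ++ t).take a.length := hA2.symm
          _ = (a ++ b).take a.length := by rw [hst]
          _ = a := List.take_left
      · refine ⟨t, ?_⟩
        have hB2 : ((s ++ L) ++ t).drop a.length = L.drop (a.length - s.length) ++ t := by
          rw [List.drop_append, drop_append_ge s L a.length (by omega),
            List.length_append,
            show a.length - (s.length + L.length) = 0 by omega, List.drop_zero]
        calc L.drop (a.length - s.length) ++ t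
            = ((s ++ L) ++ t).drop a.length := hB2.symm
          _ = (a ++ b).drop a.length := by rw [hst]
          _ = b := List.drop_left

-- embeddings
lemma infix_app_left {L a : List Char} (b : List Char) (h : L <:+: a) : L <:+: a ++ b :=
  h.trans ⟨[], b, by simp⟩
lemma infix_app_right {L b : List Char} (a : List Char) (h : L <:+: b) : L <:+: a ++ b :=
  h.trans ⟨a, [], by simp⟩

-- a newline-free nonempty needle ignores a '\n' border completely
lemma infix_append_cons_nl {L : List Char} (a b : List Char) (h0 : L ≠ []) (hn : '\n' ∉ L) :
    L <:+: a ++ '\n' :: b ↔ L <:+: a ∨ L <:+: b := by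
  constructor
  · intro h
    rcases infix_append_cases L a ('\n' :: b) h with h | h | ⟨k, hk0, hkL, _, hd⟩
    · exact Or.inl h
    · obtain ⟨s, t, hst⟩ := h
      cases s with
      | nil =>
        exfalso; apply hn
        cases L with
        | nil => exact absurd rfl h0
        | cons x L' =>
          have hx : x = '\n' := by simpa using congrArg (List.head? ·) hst
          simp [hx]
      | cons x s' =>
        refine Or.inr ⟨s', t, ?_⟩
        have := congrArg List.tail hst
        simpa using this
    · exfalso
      have hne : L.drop k ≠ [] := List.ne_nil_of_length_pos (by rw [List.length_drop]; omega)
      obtain ⟨x, d', hx⟩ := List.exists_cons_of_ne_nil hne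
      apply hn
      have hxnl : x = '\n' := by
        rw [hx] at hd
        obtain ⟨t2, ht2⟩ := hd
        simpa using congrArg (List.head? ·) ht2
      have hxm : x ∈ L.drop k := by simp [hx]
      exact hxnl ▸ List.drop_subset k L hxm
  · rintro (h | h)
    · exact infix_app_left _ h
    · refine infix_app_right a ?_
      obtain ⟨s, t, hst⟩ := h
      exact ⟨'\n' :: s, t, by simp [hst]⟩

-- appending "\n" ++ y ++ "\n" neither creates nor destroys occurrences of L
lemma append_chunk_iff (L y c : List Char) (h0 : L ≠ []) (hn : '\n' ∉ L) (hy : ¬ L <:+: y) :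
    L <:+: c ++ '\n' :: (y ++ ['\n']) ↔ L <:+: c := by
  rw [infix_append_cons_nl c _ h0 hn]
  have h2 : L <:+: y ++ '\n' :: ([] : List Char) ↔ L <:+: y ∨ L <:+: ([] : List Char) :=
    infix_append_cons_nl y [] h0 hn
  simp only [List.infix_nil] at h2
  constructor
  · rintro (h | h)
    · exact h
    · rcases h2.mp h with h | h
      · exact absurd h hy
      · exact absurd h h0
  · exact Or.inl

lemma isIn_congr {a b : List Char} (L : List Char) (h : (L <:+: a) ↔ (L <:+: b)) :
    PySem.Chars.isIn L a = PySem.Chars.isIn L b := by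
  cases hb : PySem.Chars.isIn L b
  · rw [PySem.Chars.isIn_eq_false_iff]
    exact fun hx => (PySem.Chars.isIn_eq_false_iff L b).mp hb (h.mp hx)
  · rw [PySem.Chars.isIn_iff_infix]
    exact h.mpr ((PySem.Chars.isIn_iff_infix L b).mp hb)

-- inserting a chunk y++"\n\n" right before the marker is invisible to a
-- newline-free needle L that straddles neither y nor the marker
lemma chunk_invisible (L y p q : List Char) (_h0 : L ≠ []) (hn : '\n' ∉ L)
    (hLy : ¬ L <:+: y ++ ['\n', '\n'])
    (hsY : ∀ k < L.length, 0 < k → ¬ L.drop k <+: y)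
    (hsM : ∀ k < L.length, 0 < k → ¬ L.drop k <+: pvMarker)
    (hmL : ¬ pvMarker <:+: L) :
    (L <:+: (p ++ (y ++ ['\n', '\n'])) ++ pvMarker ++ q) ↔ (L <:+: p ++ pvMarker ++ q) := by
  have hXl : (y ++ ['\n', '\n']).getLast? = some '\n' := by
    rw [List.getLast?_append_of_ne_nil y (by simp)]; rfl
  constructor
  · intro h
    have h' : L <:+: p ++ ((y ++ ['\n', '\n']) ++ (pvMarker ++ q)) := by
      simpa [List.append_assoc] using h
    rcases infix_append_cases L p _ h' with hA | hB | ⟨k, hk0, hkL, _, hd⟩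
    · exact hA.trans ⟨[], pvMarker ++ q, by simp [List.append_assoc]⟩
    · rcases infix_append_cases L _ _ hB with hB1 | hB2 | ⟨k, hk0, hkL, ht, _⟩
      · exact absurd hB1 hLy
      · exact hB2.trans ⟨p, [], by simp [List.append_assoc]⟩
      · exfalso
        have htk : L.take k ≠ [] := by
          apply List.ne_nil_of_length_pos
          rw [List.length_take]; omega
        exact hn (List.take_subset k L (suffix_last_mem ht htk hXl))
    · exfalso
      have hdn : '\n' ∉ L.drop k := fun hx => hn (List.drop_subset k L hx)
      have hdy : L.drop k <+: y := by
        apply pfx_nonl hdn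
        simpa [List.append_assoc] using hd
      exact hsY k hkL hk0 hdy
  · intro h
    have h' : L <:+: p ++ (pvMarker ++ q) := by
      simpa [List.append_assoc] using h
    rcases infix_append_cases L p (pvMarker ++ q) h' with hA | hB | ⟨k, hk0, hkL, _, hd⟩
    · exact hA.trans ⟨[], (y ++ ['\n', '\n']) ++ (pvMarker ++ q), by simp [List.append_assoc]⟩
    · exact hB.trans ⟨p ++ (y ++ ['\n', '\n']), [], by simp [List.append_assoc]⟩
    · exfalso
      rcases le_or_gt (L.drop k).length pvMarker.length with hl | hl
      · exact hsM k hkL hk0 ((pfx_short q hl).mp hd)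
      · have hmd : pvMarker <+: L.drop k :=
          List.prefix_of_prefix_length_le (List.prefix_append _ _) hd (by omega)
        exact hmL (hmd.isInfix.trans (List.drop_suffix k L).isInfix)

lemma isIn_chunk_ins (L y p q : List Char) (h0 : L ≠ []) (hn : '\n' ∉ L)
    (hLy : ¬ L <:+: y ++ ['\n', '\n'])
    (hsY : ∀ k < L.length, 0 < k → ¬ L.drop k <+: y)
    (hsM : ∀ k < L.length, 0 < k → ¬ L.drop k <+: pvMarker)
    (hmL : ¬ pvMarker <:+: L) :
    PySem.Chars.isIn L ((p ++ (y ++ ['\n', '\n'])) ++ pvMarker ++ q)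
      = PySem.Chars.isIn L (p ++ pvMarker ++ q) :=
  isIn_congr L (chunk_invisible L y p q h0 hn hLy hsY hsM hmL)

lemma isIn_append_chunk (L y c : List Char) (h0 : L ≠ []) (hn : '\n' ∉ L) (hy : ¬ L <:+: y) :
    PySem.Chars.isIn L (c ++ ['\n'] ++ y ++ ['\n']) = PySem.Chars.isIn L c := by
  apply isIn_congr
  rw [show c ++ ['\n'] ++ y ++ ['\n'] = c ++ '\n' :: (y ++ ['\n']) by simp [List.append_assoc]]
  exact append_chunk_iff L y c h0 hn hy

-- pvRep1 on an exhibited occurrence / non-occurrence at the head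
lemma rep1_prefix (old new c : List Char) (h : old <+: c) :
    pvRep1 old new c = new ++ c.drop old.length := by
  cases c with
  | nil => rw [pvRep1, if_pos (List.isPrefixOf_iff_prefix.mpr h)]
  | cons a c' => rw [pvRep1, if_pos (List.isPrefixOf_iff_prefix.mpr h)]

lemma rep1_cons_neg (old new : List Char) (a : Char) (c : List Char) (h : ¬ old <+: a :: c) :
    pvRep1 old new (a :: c) = a :: pvRep1 old new c := by
  rw [pvRep1, if_neg (fun hx => h (List.isPrefixOf_iff_prefix.mp hx))]

-- pvRep1 replaces exactly the exhibited FIRST occurrence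
lemma rep1_at_first (old new p q : List Char)
    (hscan : ∀ k < p.length, ¬ old <+: (p ++ old ++ q).drop k) :
    pvRep1 old new (p ++ old ++ q) = p ++ new ++ q := by
  induction p with
  | nil =>
    simp only [List.nil_append]
    rw [rep1_prefix old new (old ++ q) (List.prefix_append old q), List.drop_left]
  | cons a p' ih =>
    have h0 : ¬ old <+: a :: (p' ++ old ++ q) := by
      have := hscan 0 (by simp)
      simpa using this
    have hsh : (a :: p') ++ old ++ q = a :: (p' ++ old ++ q) := by simp
    rw [hsh, rep1_cons_neg old new a _ h0, ih ?_]
    · simp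
    · intro k hk
      have := hscan (k + 1) (by simp; omega)
      simpa using this

-- first-occurrence decomposition from an occurrence
lemma exists_first_split (c old : List Char) (h : old <:+: c) :
    ∃ p q, c = p ++ old ++ q ∧ ∀ k < p.length, ¬ old <+: (p ++ old ++ q).drop k := by
  have hnn : 0 ≤ PySem.Chars.find c old := (PySem.Chars.find_nonneg_iff c old).mpr h
  obtain ⟨hpre, hmin⟩ := PySem.Chars.find_spec hnn
  have hile : (PySem.Chars.find c old).toNat ≤ c.length := by
    have := PySem.Chars.find_le_length c old; omega
  obtain ⟨q, hq⟩ := hpre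
  refine ⟨c.take (PySem.Chars.find c old).toNat, q, ?_, ?_⟩
  · rw [List.append_assoc, hq, List.take_append_drop]
  · intro k hk
    rw [List.append_assoc, hq, List.take_append_drop]
    rw [List.length_take] at hk
    exact hmin k (by omega)

-- the scanning property extends over an inserted chunk y++"\n\n"
lemma scan_extend (y p q : List Char)
    (hscan : ∀ k < p.length, ¬ pvMarker <+: (p ++ pvMarker ++ q).drop k)
    (h6 : ∀ j < pvMarker.length, 0 < j → ¬ pvMarker.drop j <+: y)
    (h7 : ∀ j < (y ++ ['\n', '\n']).length, ¬ pvMarker <+: (y ++ ['\n', '\n']).drop j) :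
    ∀ k < (p ++ (y ++ ['\n', '\n'])).length,
      ¬ pvMarker <+: ((p ++ (y ++ ['\n', '\n'])) ++ pvMarker ++ q).drop k := by
  have hmn : '\n' ∉ pvMarker := by decide
  have hXl : (y ++ ['\n', '\n']).getLast? = some '\n' := by
    rw [List.getLast?_append_of_ne_nil y (by simp)]; rfl
  intro k hk hcon
  rcases lt_or_ge k p.length with hkp | hkp
  · have hdrop : ((p ++ (y ++ ['\n', '\n'])) ++ pvMarker ++ q).drop k
        = p.drop k ++ ((y ++ ['\n', '\n']) ++ (pvMarker ++ q)) := by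
      rw [List.append_assoc, List.append_assoc,
        List.drop_append_of_le_length (le_of_lt hkp)]
    rw [hdrop] at hcon
    have hdne : p.drop k ≠ [] := List.ne_nil_of_length_pos (by rw [List.length_drop]; omega)
    rcases le_or_gt pvMarker.length (p.drop k).length with hl | hl
    · have h1 : pvMarker <+: p.drop k := (pfx_short _ hl).mp hcon
      have h2 : pvMarker <+: p.drop k ++ (pvMarker ++ q) :=
        h1.trans (List.prefix_append _ _)
      have h3 : (p ++ pvMarker ++ q).drop k = p.drop k ++ (pvMarker ++ q) := by
        rw [List.append_assoc, List.drop_append_of_le_length (le_of_lt hkp)]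
      exact hscan k hkp (h3 ▸ h2)
    · have hdm : p.drop k <+: pvMarker :=
        List.prefix_of_prefix_length_le (List.prefix_append _ _) hcon (by omega)
      obtain ⟨e, he⟩ := hdm
      have hepre : p.drop k ++ e <+: p.drop k ++ ((y ++ ['\n', '\n']) ++ (pvMarker ++ q)) :=
        he ▸ hcon
      have he2 : e <+: (y ++ ['\n', '\n']) ++ (pvMarker ++ q) :=
        (List.prefix_append_right_inj (p.drop k)).mp hepre
      have henl : '\n' ∉ e := fun hx => hmn (he ▸ (List.mem_append_right _ hx))
      have he3 : e <+: y := by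
        apply pfx_nonl henl
        simpa [List.append_assoc] using he2
      have hee : e = pvMarker.drop (p.drop k).length := by
        have hcd := congrArg (List.drop (p.drop k).length) he
        rwa [List.drop_left] at hcd
      apply h6 (p.drop k).length (by
          have hlen := congrArg List.length he
          simp [List.length_append] at hlen
          omega)
        (by have := List.length_pos_iff.mpr hdne; omega)
      rwa [← hee]
  · have hj : k - p.length < (y ++ ['\n', '\n']).length := by
      rw [List.length_append] at hk; omega
    have hdrop : ((p ++ (y ++ ['\n', '\n'])) ++ pvMarker ++ q).drop k
        = (y ++ ['\n', '\n']).drop (k - p.length) ++ (pvMarker ++ q) := by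
      rw [List.append_assoc, List.append_assoc, drop_append_ge _ _ _ hkp,
        List.drop_append_of_le_length (le_of_lt hj)]
    rw [hdrop] at hcon
    have hdne : (y ++ ['\n', '\n']).drop (k - p.length) ≠ [] :=
      List.ne_nil_of_length_pos (by rw [List.length_drop]; omega)
    rcases le_or_gt pvMarker.length ((y ++ ['\n', '\n']).drop (k - p.length)).length with hl | hl
    · exact h7 (k - p.length) hj ((pfx_short _ hl).mp hcon)
    · have hdm : (y ++ ['\n', '\n']).drop (k - p.length) <+: pvMarker :=
        List.prefix_of_prefix_length_le (List.prefix_append _ _) hcon (by omega)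
      have hnle : '\n' ∈ (y ++ ['\n', '\n']).drop (k - p.length) :=
        suffix_last_mem (List.drop_suffix _ _) hdne hXl
      exact hmn (hdm.subset hnle)

-- one replace step, in canonical shape
lemma step_replace (P q y : List Char)
    (hscan : ∀ k < P.length, ¬ pvMarker <+: (P ++ pvMarker ++ q).drop k) :
    pvRep1 pvMarker (y ++ ['\n', '\n'] ++ pvMarker) (P ++ pvMarker ++ q)
      = (P ++ (y ++ ['\n', '\n'])) ++ pvMarker ++ q := by
  rw [rep1_at_first pvMarker _ P q hscan]
  simp [List.append_assoc]

-- step-unfolding of A's loop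
lemma injA_cons (l : List Char) (rest : List (List Char)) (c : List Char) :
    pvInjA (l :: rest) c = pvInjA rest
      (if PySem.Chars.isIn l c = false then
        (if PySem.Chars.isIn pvMarker c = true then
          pvRep1 pvMarker (l ++ "\n\n".toList ++ pvMarker) c
        else c ++ "\n".toList ++ l ++ "\n".toList)
      else c) := rfl
lemma injA_nil (c : List Char) : pvInjA [] c = c := rfl

lemma dNe2 : pvLine "views.css" ≠ [] := by decide
lemma dNl2 : '\n' ∉ pvLine "views.css" := by decide
lemma dNe3 : pvLine "components.css" ≠ [] := by decide
lemma dNl3 : '\n' ∉ pvLine "components.css" := by decide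
lemma dNeM : pvMarker ≠ [] := by decide
lemma dNlM : '\n' ∉ pvMarker := by decide
lemma dNI21 : ¬ pvLine "views.css" <:+: pvLine "tokens.css" := by decide
lemma dNX21 : ¬ pvLine "views.css" <:+: pvLine "tokens.css" ++ ['\n', '\n'] := by decide
lemma dSY21 : ∀ k < (pvLine "views.css").length, 0 < k → ¬ (pvLine "views.css").drop k <+: pvLine "tokens.css" := by decide
lemma dNI31 : ¬ pvLine "components.css" <:+: pvLine "tokens.css" := by decide
lemma dNX31 : ¬ pvLine "components.css" <:+: pvLine "tokens.css" ++ ['\n', '\n'] := by decide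
lemma dSY31 : ∀ k < (pvLine "components.css").length, 0 < k → ¬ (pvLine "components.css").drop k <+: pvLine "tokens.css" := by decide
lemma dNI32 : ¬ pvLine "components.css" <:+: pvLine "views.css" := by decide
lemma dNX32 : ¬ pvLine "components.css" <:+: pvLine "views.css" ++ ['\n', '\n'] := by decide
lemma dSY32 : ∀ k < (pvLine "components.css").length, 0 < k → ¬ (pvLine "components.css").drop k <+: pvLine "views.css" := by decide
lemma dSM2 : ∀ k < (pvLine "views.css").length, 0 < k → ¬ (pvLine "views.css").drop k <+: pvMarker := by decide
lemma dMI2 : ¬ pvMarker <:+: pvLine "views.css" := by decide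
lemma dSM3 : ∀ k < (pvLine "components.css").length, 0 < k → ¬ (pvLine "components.css").drop k <+: pvMarker := by decide
lemma dMI3 : ¬ pvMarker <:+: pvLine "components.css" := by decide
lemma dNIM1 : ¬ pvMarker <:+: pvLine "tokens.css" := by decide
lemma dH61 : ∀ j' < pvMarker.length, 0 < j' → ¬ pvMarker.drop j' <+: pvLine "tokens.css" := by decide
lemma dH71 : ∀ j' < (pvLine "tokens.css" ++ ['\n', '\n']).length, ¬ pvMarker <+: (pvLine "tokens.css" ++ ['\n', '\n']).drop j' := by decide
lemma dNIM2 : ¬ pvMarker <:+: pvLine "views.css" := by decide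
lemma dH62 : ∀ j' < pvMarker.length, 0 < j' → ¬ pvMarker.drop j' <+: pvLine "views.css" := by decide
lemma dH72 : ∀ j' < (pvLine "views.css" ++ ['\n', '\n']).length, ¬ pvMarker <+: (pvLine "views.css" ++ ['\n', '\n']).drop j' := by decide

lemma inj_eq (c : List Char) : pvInjA (pvCssFiles.map pvLine) c = pvInjB c := by
  have hmap : pvCssFiles.map pvLine = [pvLine "tokens.css", pvLine "views.css", pvLine "components.css"] := rfl
  rw [hmap]
  cases hb1 : PySem.Chars.isIn (pvLine "tokens.css") c with
  | false =>
    cases hb2 : PySem.Chars.isIn (pvLine "views.css") c with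
    | false =>
      cases hb3 : PySem.Chars.isIn (pvLine "components.css") c with
      | false =>
        cases hm : PySem.Chars.isIn pvMarker c with
        | false =>
          have eB : pvInjB c = c ++ ['\n'] ++ PySem.Chars.join ['\n', '\n'] [pvLine "tokens.css", pvLine "views.css", pvLine "components.css"] ++ ['\n'] := by
            simp only [pvInjB, hmap, List.filter_cons, List.filter_nil, hb1, hb2, hb3, Bool.not_true, Bool.not_false, Bool.false_eq_true, Bool.true_eq_false, eq_self_iff_true, if_true, if_false, List.isEmpty_cons, List.isEmpty_nil, hm, nn_eq, nl_eq]
          rw [injA_cons, nn_eq, nl_eq]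
          rw [if_pos hb1]
          rw [if_neg (by rw [hm]; simp)]
          have i2 : PySem.Chars.isIn (pvLine "views.css") (c ++ ['\n'] ++ pvLine "tokens.css" ++ ['\n']) = false := by
            rw [isIn_append_chunk (pvLine "views.css") (pvLine "tokens.css") c dNe2 dNl2 dNI21]
            exact hb2
          have iM2 : PySem.Chars.isIn pvMarker (c ++ ['\n'] ++ pvLine "tokens.css" ++ ['\n']) = false := by
            rw [isIn_append_chunk pvMarker (pvLine "tokens.css") c dNeM dNlM dNIM1]
            exact hm
          rw [injA_cons, nn_eq, nl_eq]
          rw [if_pos i2]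
          rw [if_neg (by rw [iM2]; simp)]
          have i3 : PySem.Chars.isIn (pvLine "components.css") ((c ++ ['\n'] ++ pvLine "tokens.css" ++ ['\n']) ++ ['\n'] ++ pvLine "views.css" ++ ['\n']) = false := by
            rw [isIn_append_chunk (pvLine "components.css") (pvLine "views.css") (c ++ ['\n'] ++ pvLine "tokens.css" ++ ['\n']) dNe3 dNl3 dNI32, isIn_append_chunk (pvLine "components.css") (pvLine "tokens.css") c dNe3 dNl3 dNI31]
            exact hb3
          have iM3 : PySem.Chars.isIn pvMarker ((c ++ ['\n'] ++ pvLine "tokens.css" ++ ['\n']) ++ ['\n'] ++ pvLine "views.css" ++ ['\n']) = false := by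
            rw [isIn_append_chunk pvMarker (pvLine "views.css") (c ++ ['\n'] ++ pvLine "tokens.css" ++ ['\n']) dNeM dNlM dNIM2, isIn_append_chunk pvMarker (pvLine "tokens.css") c dNeM dNlM dNIM1]
            exact hm
          rw [injA_cons, nn_eq, nl_eq]
          rw [if_pos i3]
          rw [if_neg (by rw [iM3]; simp)]
          rw [injA_nil, eB]
          have hfin : (((c ++ ['\n'] ++ pvLine "tokens.css" ++ ['\n']) ++ ['\n'] ++ pvLine "views.css" ++ ['\n']) ++ ['\n'] ++ pvLine "components.css" ++ ['\n']) = c ++ ['\n'] ++ PySem.Chars.join ['\n', '\n'] [pvLine "tokens.css", pvLine "views.css", pvLine "components.css"] ++ ['\n'] := by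
            first
            | (simp only [List.append_assoc]
               exact congrArg (c ++ ·) (by decide))
            | exact congrArg (c ++ ·) (by decide)
          exact hfin
        | true =>
          have eB : pvInjB c = pvRep1 pvMarker (PySem.Chars.join ['\n', '\n'] [pvLine "tokens.css", pvLine "views.css", pvLine "components.css"] ++ ['\n', '\n'] ++ pvMarker) c := by
            simp only [pvInjB, hmap, List.filter_cons, List.filter_nil, hb1, hb2, hb3, Bool.not_true, Bool.not_false, Bool.false_eq_true, Bool.true_eq_false, eq_self_iff_true, if_true, if_false, List.isEmpty_cons, List.isEmpty_nil, hm, nn_eq, nl_eq]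
          obtain ⟨p, q, hc, hscan⟩ := exists_first_split c pvMarker ((PySem.Chars.isIn_iff_infix pvMarker c).mp hm)
          rw [injA_cons, nn_eq, nl_eq]
          rw [if_pos hb1, if_pos hm]
          have e1 : pvRep1 pvMarker (pvLine "tokens.css" ++ ['\n', '\n'] ++ pvMarker) c = (p ++ (pvLine "tokens.css" ++ ['\n', '\n'])) ++ pvMarker ++ q := by
            rw [hc]
            exact step_replace p q _ hscan
          rw [e1]
          have s1 := scan_extend (pvLine "tokens.css") p q hscan dH61 dH71
          have i2 : PySem.Chars.isIn (pvLine "views.css") ((p ++ (pvLine "tokens.css" ++ ['\n', '\n'])) ++ pvMarker ++ q) = false := by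
            rw [isIn_chunk_ins (pvLine "views.css") (pvLine "tokens.css") p q dNe2 dNl2 dNX21 dSY21 dSM2 dMI2, ← hc]
            exact hb2
          have iM2 : PySem.Chars.isIn pvMarker ((p ++ (pvLine "tokens.css" ++ ['\n', '\n'])) ++ pvMarker ++ q) = true := (PySem.Chars.isIn_iff_infix _ _).mpr ⟨(p ++ (pvLine "tokens.css" ++ ['\n', '\n'])), q, rfl⟩
          rw [injA_cons, nn_eq, nl_eq]
          rw [if_pos i2, if_pos iM2]
          have e2 := step_replace (p ++ (pvLine "tokens.css" ++ ['\n', '\n'])) q (pvLine "views.css") s1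
          rw [e2]
          have s2 := scan_extend (pvLine "views.css") (p ++ (pvLine "tokens.css" ++ ['\n', '\n'])) q s1 dH62 dH72
          have i3 : PySem.Chars.isIn (pvLine "components.css") (((p ++ (pvLine "tokens.css" ++ ['\n', '\n'])) ++ (pvLine "views.css" ++ ['\n', '\n'])) ++ pvMarker ++ q) = false := by
            rw [isIn_chunk_ins (pvLine "components.css") (pvLine "views.css") (p ++ (pvLine "tokens.css" ++ ['\n', '\n'])) q dNe3 dNl3 dNX32 dSY32 dSM3 dMI3, isIn_chunk_ins (pvLine "components.css") (pvLine "tokens.css") p q dNe3 dNl3 dNX31 dSY31 dSM3 dMI3, ← hc]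
            exact hb3
          have iM3 : PySem.Chars.isIn pvMarker (((p ++ (pvLine "tokens.css" ++ ['\n', '\n'])) ++ (pvLine "views.css" ++ ['\n', '\n'])) ++ pvMarker ++ q) = true := (PySem.Chars.isIn_iff_infix _ _).mpr ⟨((p ++ (pvLine "tokens.css" ++ ['\n', '\n'])) ++ (pvLine "views.css" ++ ['\n', '\n'])), q, rfl⟩
          rw [injA_cons, nn_eq, nl_eq]
          rw [if_pos i3, if_pos iM3]
          have e3 := step_replace ((p ++ (pvLine "tokens.css" ++ ['\n', '\n'])) ++ (pvLine "views.css" ++ ['\n', '\n'])) q (pvLine "components.css") s2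
          rw [e3]
          rw [injA_nil, eB]
          have eB2 : pvRep1 pvMarker (PySem.Chars.join ['\n', '\n'] [pvLine "tokens.css", pvLine "views.css", pvLine "components.css"] ++ ['\n', '\n'] ++ pvMarker) c = (p ++ (PySem.Chars.join ['\n', '\n'] [pvLine "tokens.css", pvLine "views.css", pvLine "components.css"] ++ ['\n', '\n'])) ++ pvMarker ++ q := by
            rw [hc]
            exact step_replace p q _ hscan
          rw [eB2]
          have hfin : (((p ++ (pvLine "tokens.css" ++ ['\n', '\n'])) ++ (pvLine "views.css" ++ ['\n', '\n'])) ++ (pvLine "components.css" ++ ['\n', '\n'])) = p ++ (PySem.Chars.join ['\n', '\n'] [pvLine "tokens.css", pvLine "views.css", pvLine "components.css"] ++ ['\n', '\n']) := by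
            first
            | (simp only [List.append_assoc]
               exact congrArg (p ++ ·) (by decide))
            | exact congrArg (p ++ ·) (by decide)
          rw [hfin]
      | true =>
        cases hm : PySem.Chars.isIn pvMarker c with
        | false =>
          have eB : pvInjB c = c ++ ['\n'] ++ PySem.Chars.join ['\n', '\n'] [pvLine "tokens.css", pvLine "views.css"] ++ ['\n'] := by
            simp only [pvInjB, hmap, List.filter_cons, List.filter_nil, hb1, hb2, hb3, Bool.not_true, Bool.not_false, Bool.false_eq_true, Bool.true_eq_false, eq_self_iff_true, if_true, if_false, List.isEmpty_cons, List.isEmpty_nil, hm, nn_eq, nl_eq]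
          rw [injA_cons, nn_eq, nl_eq]
          rw [if_pos hb1]
          rw [if_neg (by rw [hm]; simp)]
          have i2 : PySem.Chars.isIn (pvLine "views.css") (c ++ ['\n'] ++ pvLine "tokens.css" ++ ['\n']) = false := by
            rw [isIn_append_chunk (pvLine "views.css") (pvLine "tokens.css") c dNe2 dNl2 dNI21]
            exact hb2
          have iM2 : PySem.Chars.isIn pvMarker (c ++ ['\n'] ++ pvLine "tokens.css" ++ ['\n']) = false := by
            rw [isIn_append_chunk pvMarker (pvLine "tokens.css") c dNeM dNlM dNIM1]
            exact hm
          rw [injA_cons, nn_eq, nl_eq]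
          rw [if_pos i2]
          rw [if_neg (by rw [iM2]; simp)]
          have i3 : PySem.Chars.isIn (pvLine "components.css") ((c ++ ['\n'] ++ pvLine "tokens.css" ++ ['\n']) ++ ['\n'] ++ pvLine "views.css" ++ ['\n']) = true := by
            rw [isIn_append_chunk (pvLine "components.css") (pvLine "views.css") (c ++ ['\n'] ++ pvLine "tokens.css" ++ ['\n']) dNe3 dNl3 dNI32, isIn_append_chunk (pvLine "components.css") (pvLine "tokens.css") c dNe3 dNl3 dNI31]
            exact hb3
          rw [injA_cons]
          rw [if_neg (by rw [i3]; simp)]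
          rw [injA_nil, eB]
          have hfin : ((c ++ ['\n'] ++ pvLine "tokens.css" ++ ['\n']) ++ ['\n'] ++ pvLine "views.css" ++ ['\n']) = c ++ ['\n'] ++ PySem.Chars.join ['\n', '\n'] [pvLine "tokens.css", pvLine "views.css"] ++ ['\n'] := by
            first
            | (simp only [List.append_assoc]
               exact congrArg (c ++ ·) (by decide))
            | exact congrArg (c ++ ·) (by decide)
          exact hfin
        | true =>
          have eB : pvInjB c = pvRep1 pvMarker (PySem.Chars.join ['\n', '\n'] [pvLine "tokens.css", pvLine "views.css"] ++ ['\n', '\n'] ++ pvMarker) c := by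
            simp only [pvInjB, hmap, List.filter_cons, List.filter_nil, hb1, hb2, hb3, Bool.not_true, Bool.not_false, Bool.false_eq_true, Bool.true_eq_false, eq_self_iff_true, if_true, if_false, List.isEmpty_cons, List.isEmpty_nil, hm, nn_eq, nl_eq]
          obtain ⟨p, q, hc, hscan⟩ := exists_first_split c pvMarker ((PySem.Chars.isIn_iff_infix pvMarker c).mp hm)
          rw [injA_cons, nn_eq, nl_eq]
          rw [if_pos hb1, if_pos hm]
          have e1 : pvRep1 pvMarker (pvLine "tokens.css" ++ ['\n', '\n'] ++ pvMarker) c = (p ++ (pvLine "tokens.css" ++ ['\n', '\n'])) ++ pvMarker ++ q := by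
            rw [hc]
            exact step_replace p q _ hscan
          rw [e1]
          have s1 := scan_extend (pvLine "tokens.css") p q hscan dH61 dH71
          have i2 : PySem.Chars.isIn (pvLine "views.css") ((p ++ (pvLine "tokens.css" ++ ['\n', '\n'])) ++ pvMarker ++ q) = false := by
            rw [isIn_chunk_ins (pvLine "views.css") (pvLine "tokens.css") p q dNe2 dNl2 dNX21 dSY21 dSM2 dMI2, ← hc]
            exact hb2
          have iM2 : PySem.Chars.isIn pvMarker ((p ++ (pvLine "tokens.css" ++ ['\n', '\n'])) ++ pvMarker ++ q) = true := (PySem.Chars.isIn_iff_infix _ _).mpr ⟨(p ++ (pvLine "tokens.css" ++ ['\n', '\n'])), q, rfl⟩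
          rw [injA_cons, nn_eq, nl_eq]
          rw [if_pos i2, if_pos iM2]
          have e2 := step_replace (p ++ (pvLine "tokens.css" ++ ['\n', '\n'])) q (pvLine "views.css") s1
          rw [e2]
          have s2 := scan_extend (pvLine "views.css") (p ++ (pvLine "tokens.css" ++ ['\n', '\n'])) q s1 dH62 dH72
          have i3 : PySem.Chars.isIn (pvLine "components.css") (((p ++ (pvLine "tokens.css" ++ ['\n', '\n'])) ++ (pvLine "views.css" ++ ['\n', '\n'])) ++ pvMarker ++ q) = true := by
            rw [isIn_chunk_ins (pvLine "components.css") (pvLine "views.css") (p ++ (pvLine "tokens.css" ++ ['\n', '\n'])) q dNe3 dNl3 dNX32 dSY32 dSM3 dMI3, isIn_chunk_ins (pvLine "components.css") (pvLine "tokens.css") p q dNe3 dNl3 dNX31 dSY31 dSM3 dMI3, ← hc]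
            exact hb3
          rw [injA_cons]
          rw [if_neg (by rw [i3]; simp)]
          rw [injA_nil, eB]
          have eB2 : pvRep1 pvMarker (PySem.Chars.join ['\n', '\n'] [pvLine "tokens.css", pvLine "views.css"] ++ ['\n', '\n'] ++ pvMarker) c = (p ++ (PySem.Chars.join ['\n', '\n'] [pvLine "tokens.css", pvLine "views.css"] ++ ['\n', '\n'])) ++ pvMarker ++ q := by
            rw [hc]
            exact step_replace p q _ hscan
          rw [eB2]
          have hfin : ((p ++ (pvLine "tokens.css" ++ ['\n', '\n'])) ++ (pvLine "views.css" ++ ['\n', '\n'])) = p ++ (PySem.Chars.join ['\n', '\n'] [pvLine "tokens.css", pvLine "views.css"] ++ ['\n', '\n']) := by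
            first
            | (simp only [List.append_assoc]
               exact congrArg (p ++ ·) (by decide))
            | exact congrArg (p ++ ·) (by decide)
          rw [hfin]
    | true =>
      cases hb3 : PySem.Chars.isIn (pvLine "components.css") c with
      | false =>
        cases hm : PySem.Chars.isIn pvMarker c with
        | false =>
          have eB : pvInjB c = c ++ ['\n'] ++ PySem.Chars.join ['\n', '\n'] [pvLine "tokens.css", pvLine "components.css"] ++ ['\n'] := by
            simp only [pvInjB, hmap, List.filter_cons, List.filter_nil, hb1, hb2, hb3, Bool.not_true, Bool.not_false, Bool.false_eq_true, Bool.true_eq_false, eq_self_iff_true, if_true, if_false, List.isEmpty_cons, List.isEmpty_nil, hm, nn_eq, nl_eq]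
          rw [injA_cons, nn_eq, nl_eq]
          rw [if_pos hb1]
          rw [if_neg (by rw [hm]; simp)]
          have i2 : PySem.Chars.isIn (pvLine "views.css") (c ++ ['\n'] ++ pvLine "tokens.css" ++ ['\n']) = true := by
            rw [isIn_append_chunk (pvLine "views.css") (pvLine "tokens.css") c dNe2 dNl2 dNI21]
            exact hb2
          rw [injA_cons]
          rw [if_neg (by rw [i2]; simp)]
          have i3 : PySem.Chars.isIn (pvLine "components.css") (c ++ ['\n'] ++ pvLine "tokens.css" ++ ['\n']) = false := by
            rw [isIn_append_chunk (pvLine "components.css") (pvLine "tokens.css") c dNe3 dNl3 dNI31]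
            exact hb3
          have iM3 : PySem.Chars.isIn pvMarker (c ++ ['\n'] ++ pvLine "tokens.css" ++ ['\n']) = false := by
            rw [isIn_append_chunk pvMarker (pvLine "tokens.css") c dNeM dNlM dNIM1]
            exact hm
          rw [injA_cons, nn_eq, nl_eq]
          rw [if_pos i3]
          rw [if_neg (by rw [iM3]; simp)]
          rw [injA_nil, eB]
          have hfin : ((c ++ ['\n'] ++ pvLine "tokens.css" ++ ['\n']) ++ ['\n'] ++ pvLine "components.css" ++ ['\n']) = c ++ ['\n'] ++ PySem.Chars.join ['\n', '\n'] [pvLine "tokens.css", pvLine "components.css"] ++ ['\n'] := by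
            first
            | (simp only [List.append_assoc]
               exact congrArg (c ++ ·) (by decide))
            | exact congrArg (c ++ ·) (by decide)
          exact hfin
        | true =>
          have eB : pvInjB c = pvRep1 pvMarker (PySem.Chars.join ['\n', '\n'] [pvLine "tokens.css", pvLine "components.css"] ++ ['\n', '\n'] ++ pvMarker) c := by
            simp only [pvInjB, hmap, List.filter_cons, List.filter_nil, hb1, hb2, hb3, Bool.not_true, Bool.not_false, Bool.false_eq_true, Bool.true_eq_false, eq_self_iff_true, if_true, if_false, List.isEmpty_cons, List.isEmpty_nil, hm, nn_eq, nl_eq]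
          obtain ⟨p, q, hc, hscan⟩ := exists_first_split c pvMarker ((PySem.Chars.isIn_iff_infix pvMarker c).mp hm)
          rw [injA_cons, nn_eq, nl_eq]
          rw [if_pos hb1, if_pos hm]
          have e1 : pvRep1 pvMarker (pvLine "tokens.css" ++ ['\n', '\n'] ++ pvMarker) c = (p ++ (pvLine "tokens.css" ++ ['\n', '\n'])) ++ pvMarker ++ q := by
            rw [hc]
            exact step_replace p q _ hscan
          rw [e1]
          have s1 := scan_extend (pvLine "tokens.css") p q hscan dH61 dH71
          have i2 : PySem.Chars.isIn (pvLine "views.css") ((p ++ (pvLine "tokens.css" ++ ['\n', '\n'])) ++ pvMarker ++ q) = true := by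
            rw [isIn_chunk_ins (pvLine "views.css") (pvLine "tokens.css") p q dNe2 dNl2 dNX21 dSY21 dSM2 dMI2, ← hc]
            exact hb2
          rw [injA_cons]
          rw [if_neg (by rw [i2]; simp)]
          have i3 : PySem.Chars.isIn (pvLine "components.css") ((p ++ (pvLine "tokens.css" ++ ['\n', '\n'])) ++ pvMarker ++ q) = false := by
            rw [isIn_chunk_ins (pvLine "components.css") (pvLine "tokens.css") p q dNe3 dNl3 dNX31 dSY31 dSM3 dMI3, ← hc]
            exact hb3
          have iM3 : PySem.Chars.isIn pvMarker ((p ++ (pvLine "tokens.css" ++ ['\n', '\n'])) ++ pvMarker ++ q) = true := (PySem.Chars.isIn_iff_infix _ _).mpr ⟨(p ++ (pvLine "tokens.css" ++ ['\n', '\n'])), q, rfl⟩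
          rw [injA_cons, nn_eq, nl_eq]
          rw [if_pos i3, if_pos iM3]
          have e3 := step_replace (p ++ (pvLine "tokens.css" ++ ['\n', '\n'])) q (pvLine "components.css") s1
          rw [e3]
          rw [injA_nil, eB]
          have eB2 : pvRep1 pvMarker (PySem.Chars.join ['\n', '\n'] [pvLine "tokens.css", pvLine "components.css"] ++ ['\n', '\n'] ++ pvMarker) c = (p ++ (PySem.Chars.join ['\n', '\n'] [pvLine "tokens.css", pvLine "components.css"] ++ ['\n', '\n'])) ++ pvMarker ++ q := by
            rw [hc]
            exact step_replace p q _ hscan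
          rw [eB2]
          have hfin : ((p ++ (pvLine "tokens.css" ++ ['\n', '\n'])) ++ (pvLine "components.css" ++ ['\n', '\n'])) = p ++ (PySem.Chars.join ['\n', '\n'] [pvLine "tokens.css", pvLine "components.css"] ++ ['\n', '\n']) := by
            first
            | (simp only [List.append_assoc]
               exact congrArg (p ++ ·) (by decide))
            | exact congrArg (p ++ ·) (by decide)
          rw [hfin]
      | true =>
        cases hm : PySem.Chars.isIn pvMarker c with
        | false =>
          have eB : pvInjB c = c ++ ['\n'] ++ PySem.Chars.join ['\n', '\n'] [pvLine "tokens.css"] ++ ['\n'] := by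
            simp only [pvInjB, hmap, List.filter_cons, List.filter_nil, hb1, hb2, hb3, Bool.not_true, Bool.not_false, Bool.false_eq_true, Bool.true_eq_false, eq_self_iff_true, if_true, if_false, List.isEmpty_cons, List.isEmpty_nil, hm, nn_eq, nl_eq]
          rw [injA_cons, nn_eq, nl_eq]
          rw [if_pos hb1]
          rw [if_neg (by rw [hm]; simp)]
          have i2 : PySem.Chars.isIn (pvLine "views.css") (c ++ ['\n'] ++ pvLine "tokens.css" ++ ['\n']) = true := by
            rw [isIn_append_chunk (pvLine "views.css") (pvLine "tokens.css") c dNe2 dNl2 dNI21]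
            exact hb2
          rw [injA_cons]
          rw [if_neg (by rw [i2]; simp)]
          have i3 : PySem.Chars.isIn (pvLine "components.css") (c ++ ['\n'] ++ pvLine "tokens.css" ++ ['\n']) = true := by
            rw [isIn_append_chunk (pvLine "components.css") (pvLine "tokens.css") c dNe3 dNl3 dNI31]
            exact hb3
          rw [injA_cons]
          rw [if_neg (by rw [i3]; simp)]
          rw [injA_nil, eB]
          have hfin : (c ++ ['\n'] ++ pvLine "tokens.css" ++ ['\n']) = c ++ ['\n'] ++ PySem.Chars.join ['\n', '\n'] [pvLine "tokens.css"] ++ ['\n'] := by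
            first
            | (simp only [List.append_assoc]
               exact congrArg (c ++ ·) (by decide))
            | exact congrArg (c ++ ·) (by decide)
          exact hfin
        | true =>
          have eB : pvInjB c = pvRep1 pvMarker (PySem.Chars.join ['\n', '\n'] [pvLine "tokens.css"] ++ ['\n', '\n'] ++ pvMarker) c := by
            simp only [pvInjB, hmap, List.filter_cons, List.filter_nil, hb1, hb2, hb3, Bool.not_true, Bool.not_false, Bool.false_eq_true, Bool.true_eq_false, eq_self_iff_true, if_true, if_false, List.isEmpty_cons, List.isEmpty_nil, hm, nn_eq, nl_eq]
          obtain ⟨p, q, hc, hscan⟩ := exists_first_split c pvMarker ((PySem.Chars.isIn_iff_infix pvMarker c).mp hm)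
          rw [injA_cons, nn_eq, nl_eq]
          rw [if_pos hb1, if_pos hm]
          have e1 : pvRep1 pvMarker (pvLine "tokens.css" ++ ['\n', '\n'] ++ pvMarker) c = (p ++ (pvLine "tokens.css" ++ ['\n', '\n'])) ++ pvMarker ++ q := by
            rw [hc]
            exact step_replace p q _ hscan
          rw [e1]
          have s1 := scan_extend (pvLine "tokens.css") p q hscan dH61 dH71
          have i2 : PySem.Chars.isIn (pvLine "views.css") ((p ++ (pvLine "tokens.css" ++ ['\n', '\n'])) ++ pvMarker ++ q) = true := by
            rw [isIn_chunk_ins (pvLine "views.css") (pvLine "tokens.css") p q dNe2 dNl2 dNX21 dSY21 dSM2 dMI2, ← hc]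
            exact hb2
          rw [injA_cons]
          rw [if_neg (by rw [i2]; simp)]
          have i3 : PySem.Chars.isIn (pvLine "components.css") ((p ++ (pvLine "tokens.css" ++ ['\n', '\n'])) ++ pvMarker ++ q) = true := by
            rw [isIn_chunk_ins (pvLine "components.css") (pvLine "tokens.css") p q dNe3 dNl3 dNX31 dSY31 dSM3 dMI3, ← hc]
            exact hb3
          rw [injA_cons]
          rw [if_neg (by rw [i3]; simp)]
          rw [injA_nil, eB]
          have eB2 : pvRep1 pvMarker (PySem.Chars.join ['\n', '\n'] [pvLine "tokens.css"] ++ ['\n', '\n'] ++ pvMarker) c = (p ++ (PySem.Chars.join ['\n', '\n'] [pvLine "tokens.css"] ++ ['\n', '\n'])) ++ pvMarker ++ q := by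
            rw [hc]
            exact step_replace p q _ hscan
          rw [eB2]
          have hfin : (p ++ (pvLine "tokens.css" ++ ['\n', '\n'])) = p ++ (PySem.Chars.join ['\n', '\n'] [pvLine "tokens.css"] ++ ['\n', '\n']) := by
            first
            | (simp only [List.append_assoc]
               exact congrArg (p ++ ·) (by decide))
            | exact congrArg (p ++ ·) (by decide)
          rw [hfin]
  | true =>
    cases hb2 : PySem.Chars.isIn (pvLine "views.css") c with
    | false =>
      cases hb3 : PySem.Chars.isIn (pvLine "components.css") c with
      | false =>
        cases hm : PySem.Chars.isIn pvMarker c with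
        | false =>
          have eB : pvInjB c = c ++ ['\n'] ++ PySem.Chars.join ['\n', '\n'] [pvLine "views.css", pvLine "components.css"] ++ ['\n'] := by
            simp only [pvInjB, hmap, List.filter_cons, List.filter_nil, hb1, hb2, hb3, Bool.not_true, Bool.not_false, Bool.false_eq_true, Bool.true_eq_false, eq_self_iff_true, if_true, if_false, List.isEmpty_cons, List.isEmpty_nil, hm, nn_eq, nl_eq]
          rw [injA_cons]
          rw [if_neg (by rw [hb1]; simp)]
          rw [injA_cons, nn_eq, nl_eq]
          rw [if_pos hb2]
          rw [if_neg (by rw [hm]; simp)]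
          have i3 : PySem.Chars.isIn (pvLine "components.css") (c ++ ['\n'] ++ pvLine "views.css" ++ ['\n']) = false := by
            rw [isIn_append_chunk (pvLine "components.css") (pvLine "views.css") c dNe3 dNl3 dNI32]
            exact hb3
          have iM3 : PySem.Chars.isIn pvMarker (c ++ ['\n'] ++ pvLine "views.css" ++ ['\n']) = false := by
            rw [isIn_append_chunk pvMarker (pvLine "views.css") c dNeM dNlM dNIM2]
            exact hm
          rw [injA_cons, nn_eq, nl_eq]
          rw [if_pos i3]
          rw [if_neg (by rw [iM3]; simp)]
          rw [injA_nil, eB]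
          have hfin : ((c ++ ['\n'] ++ pvLine "views.css" ++ ['\n']) ++ ['\n'] ++ pvLine "components.css" ++ ['\n']) = c ++ ['\n'] ++ PySem.Chars.join ['\n', '\n'] [pvLine "views.css", pvLine "components.css"] ++ ['\n'] := by
            first
            | (simp only [List.append_assoc]
               exact congrArg (c ++ ·) (by decide))
            | exact congrArg (c ++ ·) (by decide)
          exact hfin
        | true =>
          have eB : pvInjB c = pvRep1 pvMarker (PySem.Chars.join ['\n', '\n'] [pvLine "views.css", pvLine "components.css"] ++ ['\n', '\n'] ++ pvMarker) c := by
            simp only [pvInjB, hmap, List.filter_cons, List.filter_nil, hb1, hb2, hb3, Bool.not_true, Bool.not_false, Bool.false_eq_true, Bool.true_eq_false, eq_self_iff_true, if_true, if_false, List.isEmpty_cons, List.isEmpty_nil, hm, nn_eq, nl_eq]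
          obtain ⟨p, q, hc, hscan⟩ := exists_first_split c pvMarker ((PySem.Chars.isIn_iff_infix pvMarker c).mp hm)
          rw [injA_cons]
          rw [if_neg (by rw [hb1]; simp)]
          rw [injA_cons, nn_eq, nl_eq]
          rw [if_pos hb2, if_pos hm]
          have e2 : pvRep1 pvMarker (pvLine "views.css" ++ ['\n', '\n'] ++ pvMarker) c = (p ++ (pvLine "views.css" ++ ['\n', '\n'])) ++ pvMarker ++ q := by
            rw [hc]
            exact step_replace p q _ hscan
          rw [e2]
          have s2 := scan_extend (pvLine "views.css") p q hscan dH62 dH72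
          have i3 : PySem.Chars.isIn (pvLine "components.css") ((p ++ (pvLine "views.css" ++ ['\n', '\n'])) ++ pvMarker ++ q) = false := by
            rw [isIn_chunk_ins (pvLine "components.css") (pvLine "views.css") p q dNe3 dNl3 dNX32 dSY32 dSM3 dMI3, ← hc]
            exact hb3
          have iM3 : PySem.Chars.isIn pvMarker ((p ++ (pvLine "views.css" ++ ['\n', '\n'])) ++ pvMarker ++ q) = true := (PySem.Chars.isIn_iff_infix _ _).mpr ⟨(p ++ (pvLine "views.css" ++ ['\n', '\n'])), q, rfl⟩
          rw [injA_cons, nn_eq, nl_eq]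
          rw [if_pos i3, if_pos iM3]
          have e3 := step_replace (p ++ (pvLine "views.css" ++ ['\n', '\n'])) q (pvLine "components.css") s2
          rw [e3]
          rw [injA_nil, eB]
          have eB2 : pvRep1 pvMarker (PySem.Chars.join ['\n', '\n'] [pvLine "views.css", pvLine "components.css"] ++ ['\n', '\n'] ++ pvMarker) c = (p ++ (PySem.Chars.join ['\n', '\n'] [pvLine "views.css", pvLine "components.css"] ++ ['\n', '\n'])) ++ pvMarker ++ q := by
            rw [hc]
            exact step_replace p q _ hscan
          rw [eB2]
          have hfin : ((p ++ (pvLine "views.css" ++ ['\n', '\n'])) ++ (pvLine "components.css" ++ ['\n', '\n'])) = p ++ (PySem.Chars.join ['\n', '\n'] [pvLine "views.css", pvLine "components.css"] ++ ['\n', '\n']) := by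
            first
            | (simp only [List.append_assoc]
               exact congrArg (p ++ ·) (by decide))
            | exact congrArg (p ++ ·) (by decide)
          rw [hfin]
      | true =>
        cases hm : PySem.Chars.isIn pvMarker c with
        | false =>
          have eB : pvInjB c = c ++ ['\n'] ++ PySem.Chars.join ['\n', '\n'] [pvLine "views.css"] ++ ['\n'] := by
            simp only [pvInjB, hmap, List.filter_cons, List.filter_nil, hb1, hb2, hb3, Bool.not_true, Bool.not_false, Bool.false_eq_true, Bool.true_eq_false, eq_self_iff_true, if_true, if_false, List.isEmpty_cons, List.isEmpty_nil, hm, nn_eq, nl_eq]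
          rw [injA_cons]
          rw [if_neg (by rw [hb1]; simp)]
          rw [injA_cons, nn_eq, nl_eq]
          rw [if_pos hb2]
          rw [if_neg (by rw [hm]; simp)]
          have i3 : PySem.Chars.isIn (pvLine "components.css") (c ++ ['\n'] ++ pvLine "views.css" ++ ['\n']) = true := by
            rw [isIn_append_chunk (pvLine "components.css") (pvLine "views.css") c dNe3 dNl3 dNI32]
            exact hb3
          rw [injA_cons]
          rw [if_neg (by rw [i3]; simp)]
          rw [injA_nil, eB]
          have hfin : (c ++ ['\n'] ++ pvLine "views.css" ++ ['\n']) = c ++ ['\n'] ++ PySem.Chars.join ['\n', '\n'] [pvLine "views.css"] ++ ['\n'] := by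
            first
            | (simp only [List.append_assoc]
               exact congrArg (c ++ ·) (by decide))
            | exact congrArg (c ++ ·) (by decide)
          exact hfin
        | true =>
          have eB : pvInjB c = pvRep1 pvMarker (PySem.Chars.join ['\n', '\n'] [pvLine "views.css"] ++ ['\n', '\n'] ++ pvMarker) c := by
            simp only [pvInjB, hmap, List.filter_cons, List.filter_nil, hb1, hb2, hb3, Bool.not_true, Bool.not_false, Bool.false_eq_true, Bool.true_eq_false, eq_self_iff_true, if_true, if_false, List.isEmpty_cons, List.isEmpty_nil, hm, nn_eq, nl_eq]
          obtain ⟨p, q, hc, hscan⟩ := exists_first_split c pvMarker ((PySem.Chars.isIn_iff_infix pvMarker c).mp hm)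
          rw [injA_cons]
          rw [if_neg (by rw [hb1]; simp)]
          rw [injA_cons, nn_eq, nl_eq]
          rw [if_pos hb2, if_pos hm]
          have e2 : pvRep1 pvMarker (pvLine "views.css" ++ ['\n', '\n'] ++ pvMarker) c = (p ++ (pvLine "views.css" ++ ['\n', '\n'])) ++ pvMarker ++ q := by
            rw [hc]
            exact step_replace p q _ hscan
          rw [e2]
          have s2 := scan_extend (pvLine "views.css") p q hscan dH62 dH72
          have i3 : PySem.Chars.isIn (pvLine "components.css") ((p ++ (pvLine "views.css" ++ ['\n', '\n'])) ++ pvMarker ++ q) = true := by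
            rw [isIn_chunk_ins (pvLine "components.css") (pvLine "views.css") p q dNe3 dNl3 dNX32 dSY32 dSM3 dMI3, ← hc]
            exact hb3
          rw [injA_cons]
          rw [if_neg (by rw [i3]; simp)]
          rw [injA_nil, eB]
          have eB2 : pvRep1 pvMarker (PySem.Chars.join ['\n', '\n'] [pvLine "views.css"] ++ ['\n', '\n'] ++ pvMarker) c = (p ++ (PySem.Chars.join ['\n', '\n'] [pvLine "views.css"] ++ ['\n', '\n'])) ++ pvMarker ++ q := by
            rw [hc]
            exact step_replace p q _ hscan
          rw [eB2]
          have hfin : (p ++ (pvLine "views.css" ++ ['\n', '\n'])) = p ++ (PySem.Chars.join ['\n', '\n'] [pvLine "views.css"] ++ ['\n', '\n']) := by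
            first
            | (simp only [List.append_assoc]
               exact congrArg (p ++ ·) (by decide))
            | exact congrArg (p ++ ·) (by decide)
          rw [hfin]
    | true =>
      cases hb3 : PySem.Chars.isIn (pvLine "components.css") c with
      | false =>
        cases hm : PySem.Chars.isIn pvMarker c with
        | false =>
          have eB : pvInjB c = c ++ ['\n'] ++ PySem.Chars.join ['\n', '\n'] [pvLine "components.css"] ++ ['\n'] := by
            simp only [pvInjB, hmap, List.filter_cons, List.filter_nil, hb1, hb2, hb3, Bool.not_true, Bool.not_false, Bool.false_eq_true, Bool.true_eq_false, eq_self_iff_true, if_true, if_false, List.isEmpty_cons, List.isEmpty_nil, hm, nn_eq, nl_eq]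
          rw [injA_cons]
          rw [if_neg (by rw [hb1]; simp)]
          rw [injA_cons]
          rw [if_neg (by rw [hb2]; simp)]
          rw [injA_cons, nn_eq, nl_eq]
          rw [if_pos hb3]
          rw [if_neg (by rw [hm]; simp)]
          rw [injA_nil, eB]
          have hfin : (c ++ ['\n'] ++ pvLine "components.css" ++ ['\n']) = c ++ ['\n'] ++ PySem.Chars.join ['\n', '\n'] [pvLine "components.css"] ++ ['\n'] := by
            first
            | (simp only [List.append_assoc]
               exact congrArg (c ++ ·) (by decide))
            | exact congrArg (c ++ ·) (by decide)
          exact hfin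
        | true =>
          have eB : pvInjB c = pvRep1 pvMarker (PySem.Chars.join ['\n', '\n'] [pvLine "components.css"] ++ ['\n', '\n'] ++ pvMarker) c := by
            simp only [pvInjB, hmap, List.filter_cons, List.filter_nil, hb1, hb2, hb3, Bool.not_true, Bool.not_false, Bool.false_eq_true, Bool.true_eq_false, eq_self_iff_true, if_true, if_false, List.isEmpty_cons, List.isEmpty_nil, hm, nn_eq, nl_eq]
          obtain ⟨p, q, hc, hscan⟩ := exists_first_split c pvMarker ((PySem.Chars.isIn_iff_infix pvMarker c).mp hm)
          rw [injA_cons]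
          rw [if_neg (by rw [hb1]; simp)]
          rw [injA_cons]
          rw [if_neg (by rw [hb2]; simp)]
          rw [injA_cons, nn_eq, nl_eq]
          rw [if_pos hb3, if_pos hm]
          have e3 : pvRep1 pvMarker (pvLine "components.css" ++ ['\n', '\n'] ++ pvMarker) c = (p ++ (pvLine "components.css" ++ ['\n', '\n'])) ++ pvMarker ++ q := by
            rw [hc]
            exact step_replace p q _ hscan
          rw [e3]
          rw [injA_nil, eB]
          have eB2 : pvRep1 pvMarker (PySem.Chars.join ['\n', '\n'] [pvLine "components.css"] ++ ['\n', '\n'] ++ pvMarker) c = (p ++ (PySem.Chars.join ['\n', '\n'] [pvLine "components.css"] ++ ['\n', '\n'])) ++ pvMarker ++ q := by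
            rw [hc]
            exact step_replace p q _ hscan
          rw [eB2]
          have hfin : (p ++ (pvLine "components.css" ++ ['\n', '\n'])) = p ++ (PySem.Chars.join ['\n', '\n'] [pvLine "components.css"] ++ ['\n', '\n']) := by
            first
            | (simp only [List.append_assoc]
               exact congrArg (p ++ ·) (by decide))
            | exact congrArg (p ++ ·) (by decide)
          rw [hfin]
      | true =>
        cases hm : PySem.Chars.isIn pvMarker c with
        | false =>
          have eB : pvInjB c = c := by
            simp only [pvInjB, hmap, List.filter_cons, List.filter_nil, hb1, hb2, hb3, Bool.not_true, Bool.not_false, Bool.false_eq_true, Bool.true_eq_false, eq_self_iff_true, if_true, if_false, List.isEmpty_cons, List.isEmpty_nil, hm, nn_eq, nl_eq]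
          rw [injA_cons]
          rw [if_neg (by rw [hb1]; simp)]
          rw [injA_cons]
          rw [if_neg (by rw [hb2]; simp)]
          rw [injA_cons]
          rw [if_neg (by rw [hb3]; simp)]
          rw [injA_nil, eB]
        | true =>
          have eB : pvInjB c = c := by
            simp only [pvInjB, hmap, List.filter_cons, List.filter_nil, hb1, hb2, hb3, Bool.not_true, Bool.not_false, Bool.false_eq_true, Bool.true_eq_false, eq_self_iff_true, if_true, if_false, List.isEmpty_cons, List.isEmpty_nil, hm, nn_eq, nl_eq]
          rw [injA_cons]
          rw [if_neg (by rw [hb1]; simp)]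
          rw [injA_cons]
          rw [if_neg (by rw [hb2]; simp)]
          rw [injA_cons]
          rw [if_neg (by rw [hb3]; simp)]
          rw [injA_nil, eB]

-- ===== VERDICT (by name: the statement is the Claim_ definition above) =====
theorem inject_imports_py_spec : Claim_equal_inject_imports_py := by
  unfold Claim_equal_inject_imports_py
  intro content _
  unfold Spec_inject_imports_py inject_imports_py inject_imports_py_alt
  exact congrArg String.ofList (inj_eq content.toList)
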